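-- pv_equiv track=rewrite | github.com/Eacosta06/Proyecto-Eacosta-Algoritmos-2324-3 | Proyecto/funcionesObjetos.py | crear_mapa
-- ===== SOURCE A (Python) =====
-- def crear_mapa(numero_asientos):
--     """Esta función crea una matriz con filas de máximo 10 puestos,
--     siendo la capacidad del estadio el n máximo"""
--     mapa = []
--     fila = []
--     n = 1
--     nFila = 1
--     while n <= numero_asientos:
--         if nFila < 10:
--             fila.append(n)
--             n += 1
--             nFila += 1
--         elif nFila == 10:
--             fila.append(n)
--             mapa.append(fila)
--             fila = []
--             nFila = 1
--             n += 1
--     if len(fila) != 0: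
--         mapa.append(fila)
--     return mapa
-- ===== SOURCE B (Python) =====
-- def crear_mapa(numero_asientos):
--     """Esta función crea una matriz con filas de máximo 10 puestos,
--     siendo la capacidad del estadio el n máximo"""
--     return [list(range(i, min(i + 10, numero_asientos + 1)))
--             for i in range(1, numero_asientos + 1, 10)]
-- ===== Notes on version B (the rewrite author's own statement) =====
-- stated objective: simpler
-- what changed: Replaces the per-element while loop with n/nFila counters and manual row flush by a per-row stepped range: one chunk-start range with step 10 and a range slice for each row.
import Mathlib
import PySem

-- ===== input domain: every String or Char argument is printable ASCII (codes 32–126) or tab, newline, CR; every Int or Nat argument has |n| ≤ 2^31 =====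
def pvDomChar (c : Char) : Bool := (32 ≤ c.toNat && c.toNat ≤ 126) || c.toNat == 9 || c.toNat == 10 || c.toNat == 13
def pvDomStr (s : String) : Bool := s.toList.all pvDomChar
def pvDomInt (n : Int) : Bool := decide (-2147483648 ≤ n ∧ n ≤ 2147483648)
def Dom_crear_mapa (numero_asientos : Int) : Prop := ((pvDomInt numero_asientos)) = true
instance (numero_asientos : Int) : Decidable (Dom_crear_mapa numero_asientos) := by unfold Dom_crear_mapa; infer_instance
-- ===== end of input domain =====

-- B builds each row directly as a range slice from a stepped range of row starts, instead of
-- A's per-element while loop with n/nFila counters and a manual row flush (objective: simpler).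

-- ===== PORT A =====
-- the while loop of A: state (mapa, fila, nFila, n); returns (mapa, fila) at exit.
-- The final 'else' (nFila outside {<10, =10}) is unreachable from the initial state
-- (Python would loop forever there); returning the state keeps the Lean function total.
def crearLoop (N n nFila : Int) (fila : List Int) (mapa : List (List Int)) :
    List (List Int) × List Int :=
  if n ≤ N then
    if nFila < 10 then
      crearLoop N (n + 1) (nFila + 1) (fila ++ [n]) mapa
    else if nFila = 10 then
      crearLoop N (n + 1) 1 [] (mapa ++ [fila ++ [n]])
    else (mapa, fila)
  else (mapa, fila)
termination_by (N + 1 - n).toNat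
decreasing_by all_goals omega

def crear_mapa (numero_asientos : Int) : List (List Int) :=
  (fun r : List (List Int) × List Int =>
    if r.2.length ≠ 0 then r.1 ++ [r.2] else r.1)
  (crearLoop numero_asientos 1 1 [] [])

-- ===== PORT B =====
def crear_mapa_alt (numero_asientos : Int) : List (List Int) :=
  (PySem.List.pyRange 1 (numero_asientos + 1) 10).map
    (fun i => PySem.List.pyRange i (min (i + 10) (numero_asientos + 1)) 1)

-- ===== PRECONDITION & SPEC =====
def Spec_crear_mapa (numero_asientos : Int) (out : List (List Int)) : Prop := out = crear_mapa_alt numero_asientos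
instance (numero_asientos : Int) (out : List (List Int)) : Decidable (Spec_crear_mapa numero_asientos out) := by unfold Spec_crear_mapa; infer_instance

-- ===== CLAIM (what is proved, stated in full; the proofs are below) =====
def Claim_equal_crear_mapa : Prop := ∀ (numero_asientos : Int), Dom_crear_mapa numero_asientos → Spec_crear_mapa numero_asientos (crear_mapa numero_asientos)

-- ===== LEMMAS AND PROOFS =====

-- the common reference: rows of [n..N] in chunks of 10
def rowsFrom (N n : Int) : List (List Int) :=
  if n ≤ N then
    PySem.List.pyRange n (min (n + 10) (N + 1)) 1 :: rowsFrom N (n + 10)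
  else []
termination_by (N + 1 - n).toNat
decreasing_by omega

lemma rowsFrom_nil {N n : Int} (h : ¬ n ≤ N) : rowsFrom N n = [] := by
  rw [rowsFrom]; simp [h]

lemma rowsFrom_cons {N n : Int} (h : n ≤ N) :
    rowsFrom N n = PySem.List.pyRange n (min (n + 10) (N + 1)) 1 :: rowsFrom N (n + 10) := by
  rw [rowsFrom]; simp [h]

lemma pyRange10_nil {a b : Int} (h : b ≤ a) : PySem.List.pyRange a b 10 = [] := by
  rw [PySem.List.pyRange_of_pos a b (by norm_num)]
  simp [show ¬ a < b by omega]

lemma pyRange10_cons {a b : Int} (h : a < b) :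
    PySem.List.pyRange a b 10 = a :: PySem.List.pyRange (a + 10) b 10 := by
  rw [PySem.List.pyRange_of_pos a b (by norm_num),
      PySem.List.pyRange_of_pos (a + 10) b (by norm_num)]
  by_cases h2 : a + 10 < b
  · have hc : ((b - a + 10 - 1) / 10).toNat = ((b - (a + 10) + 10 - 1) / 10).toNat + 1 := by
      omega
    rw [if_pos h, if_pos h2, hc, List.range_succ_eq_map]
    simp [List.map_map, Function.comp]
    intro k _
    ring
  · have hc : ((b - a + 10 - 1) / 10).toNat = 1 := by omega
    rw [if_pos h, if_neg h2, hc]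
    simp

-- B equals the reference rows
lemma B_eq_rows (N : Int) : ∀ (m : Nat) (n : Int), (N + 1 - n).toNat ≤ m →
    (PySem.List.pyRange n (N + 1) 10).map
      (fun i => PySem.List.pyRange i (min (i + 10) (N + 1)) 1) = rowsFrom N n := by
  intro m
  induction m with
  | zero =>
    intro n hm
    rw [rowsFrom_nil (by omega), pyRange10_nil (by omega)]
    simp
  | succ m ih =>
    intro n hm
    by_cases hn : n ≤ N
    · rw [pyRange10_cons (by omega), rowsFrom_cons hn]
      simp only [List.map_cons]
      exact congrArg _ (ih (n + 10) (by omega))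
    · rw [rowsFrom_nil hn, pyRange10_nil (by omega)]
      simp

-- the flush A performs after the loop
def finishA (r : List (List Int) × List Int) : List (List Int) :=
  if r.2.length ≠ 0 then r.1 ++ [r.2] else r.1

-- loop invariant for A: with 1 ≤ k ≤ 10 and current partial row fila,
-- the flushed loop result is mapa, the completed current row, then full rows of 10.
lemma A_inv (N : Int) : ∀ (m : Nat) (n k : Int) (fila : List Int) (mapa : List (List Int)),
    (N + 1 - n).toNat ≤ m → 1 ≤ k → k ≤ 10 →
    finishA (crearLoop N n k fila mapa) =
      if n ≤ N then
        (if n + (10 - k) ≤ N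
         then (mapa ++ [fila ++ PySem.List.pyRange n (n + (11 - k)) 1]) ++ rowsFrom N (n + (11 - k))
         else mapa ++ [fila ++ PySem.List.pyRange n (N + 1) 1])
      else finishA (mapa, fila) := by
  intro m
  induction m with
  | zero =>
    intro n k fila mapa hm hk1 hk10
    rw [crearLoop, if_neg (by omega : ¬ n ≤ N), if_neg (by omega : ¬ n ≤ N)]
  | succ m ih =>
    intro n k fila mapa hm hk1 hk10
    by_cases hn : n ≤ N
    · rw [crearLoop, if_pos hn, if_pos hn]
      by_cases hk : k < 10
      · rw [if_pos hk, ih (n + 1) (k + 1) (fila ++ [n]) mapa (by omega) (by omega) (by omega)]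
        by_cases hc : n + (10 - k) ≤ N
        · rw [if_pos (show n + 1 ≤ N by omega), if_pos (show (n+1) + (10 - (k+1)) ≤ N by omega),
              if_pos hc,
              show (n + 1) + (11 - (k + 1)) = n + (11 - k) by ring,
              PySem.List.pyRange_one_cons (show n < n + (11 - k) by omega)]
          simp
        · by_cases hn1 : n + 1 ≤ N
          · rw [if_pos hn1, if_neg (show ¬ (n+1) + (10 - (k+1)) ≤ N by omega), if_neg hc,
                PySem.List.pyRange_one_cons (show n < N + 1 by omega)]
            simp
          · rw [if_neg hn1, if_neg hc]
            have hN : N + 1 = n + 1 := by omega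
            rw [hN, PySem.List.pyRange_one_singleton]
            simp [finishA]
      · have hkk : k = 10 := by omega
        subst hkk
        rw [if_neg hk, if_pos rfl,
            ih (n + 1) 1 [] (mapa ++ [fila ++ [n]]) (by omega) (by omega) (by omega),
            show n + (10 - (10:Int)) = n by ring, if_pos hn,
            show n + (11 - (10:Int)) = n + 1 by ring,
            show (n:Int) + 1 + (10 - 1) = n + 10 by ring,
            show (n:Int) + 1 + (11 - 1) = n + 11 by ring,
            PySem.List.pyRange_one_singleton]
        by_cases hn1 : n + 1 ≤ N
        · rw [if_pos hn1, rowsFrom_cons hn1,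
              show (n:Int) + 1 + 10 = n + 11 by ring]
          by_cases hc : n + 10 ≤ N
          · rw [if_pos hc, show min ((n:Int) + 11) (N + 1) = n + 11 by omega]
            simp
          · rw [if_neg hc, show min ((n:Int) + 11) (N + 1) = N + 1 by omega,
                rowsFrom_nil (show ¬ (n:Int) + 11 ≤ N by omega)]
            simp
        · rw [if_neg hn1, rowsFrom_nil hn1]
          simp [finishA]
    · rw [crearLoop, if_neg hn, if_neg hn]

lemma A_eq_rows (N : Int) : crear_mapa N = rowsFrom N 1 := by
  show finishA (crearLoop N 1 1 [] []) = rowsFrom N 1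
  rw [A_inv N (N + 1 - 1).toNat 1 1 [] [] (by omega) (by omega) (by omega)]
  by_cases hn : (1:Int) ≤ N
  · rw [if_pos hn, rowsFrom_cons hn]
    by_cases hc : (1:Int) + (10 - 1) ≤ N
    · rw [if_pos hc, show min ((1:Int) + 10) (N + 1) = 11 by omega,
          show (1:Int) + (11 - 1) = 11 by norm_num]
      simp
    · rw [if_neg hc, show min ((1:Int) + 10) (N + 1) = N + 1 by omega,
          rowsFrom_nil (show ¬ (1:Int) + 10 ≤ N by omega)]
      simp
  · rw [if_neg hn, rowsFrom_nil hn]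
    simp [finishA]

-- ===== VERDICT (by name: the statement is the Claim_ definition above) =====
theorem crear_mapa_spec : Claim_equal_crear_mapa := by
  intro N _
  show crear_mapa N = crear_mapa_alt N
  rw [A_eq_rows, crear_mapa_alt, B_eq_rows N (N + 1 - 1).toNat 1 (by omega)]
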